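-- pv_equiv track=rewrite | github.com/YukihiroTaniguchi/Think-Python | script/chapter9.py | get_2_3
-- ===== SOURCE A (Python) =====
-- def get_2_3(word):
--     count = 0
--     for i in range(0, len(word) - 1, 2):
--         if word[i] == word[i+1] :
--             count = count + 1
--     if count == 3:
--         return True
--     return False
-- ===== SOURCE B (Python) =====
-- def get_2_3(word):
--     count = 0
--     rest = word
--     while len(rest) >= 2:
--         if rest[0] == rest[1]:
--             count += 1
--         rest = rest[2:]
--     return count == 3
-- ===== Notes on version B (the rewrite author's own statement) =====
-- stated objective: alternative
-- what changed: B consumes the string two characters from the front at a time (suffix consumption, then a final count==3 comparison expression) instead of A's index loop stepping by 2 with explicit if/return True/return False.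
import Mathlib
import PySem

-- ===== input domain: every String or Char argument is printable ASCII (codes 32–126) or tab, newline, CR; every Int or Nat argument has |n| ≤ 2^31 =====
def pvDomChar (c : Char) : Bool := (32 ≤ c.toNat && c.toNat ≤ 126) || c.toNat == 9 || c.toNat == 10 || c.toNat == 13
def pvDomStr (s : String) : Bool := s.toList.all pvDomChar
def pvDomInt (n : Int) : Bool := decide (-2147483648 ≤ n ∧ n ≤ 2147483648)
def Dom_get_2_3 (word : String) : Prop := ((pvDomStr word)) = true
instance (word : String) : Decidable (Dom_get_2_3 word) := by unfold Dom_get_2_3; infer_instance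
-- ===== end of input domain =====

-- B replaces A's index loop stepping by 2 with suffix consumption: it eats the string
-- two characters from the front at a time and compares the final count with 3 (alternative).

-- ===== PORT A =====
-- A: count over range(0, len(word)-1, 2) of word[i] == word[i+1]; then if count == 3.
-- (indices produced by the range are always in bounds, so word[i] never raises)
def get_2_3 (word : String) : Bool :=
  let cs := word.toList
  let count : Int :=
    (PySem.List.pyRange 0 ((cs.length : Int) - 1) 2).foldl
      (fun count i =>
        if PySem.List.pyGetD cs i ' ' = PySem.List.pyGetD cs (i + 1) ' ' then count + 1
        else count)
      0
  if count = 3 then true else false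

-- ===== PORT B =====
-- while len(rest) >= 2: the pattern a :: b :: rest is exactly len(rest) >= 2 with
-- rest[0] = a, rest[1] = b and rest[2:] = rest (slicing 2: on a list is dropping two).
def altLoop : List Char → Int → Int
  | a :: b :: rest, count => altLoop rest (if a = b then count + 1 else count)
  | _, count => count

def get_2_3_alt (word : String) : Bool :=
  altLoop word.toList 0 == 3

-- ===== PRECONDITION & SPEC =====
def Spec_get_2_3 (word : String) (out : Bool) : Prop := out = get_2_3_alt word
instance (word : String) (out : Bool) : Decidable (Spec_get_2_3 word out) := by unfold Spec_get_2_3; infer_instance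

-- ===== CLAIM (what is proved, stated in full; the proofs are below) =====
def Claim_equal_get_2_3 : Prop := ∀ (word : String), Dom_get_2_3 word → Spec_get_2_3 word (get_2_3 word)

-- ===== LEMMAS AND PROOFS =====

theorem range_pairs : ∀ (r : List Char) (c : Int),
    (List.range (r.length / 2)).foldl
      (fun c k => if r.getD (2*k) ' ' = r.getD (2*k+1) ' ' then c+1 else c) c
      = altLoop r c
  | [], c => by simp [altLoop]
  | [a], c => by simp [altLoop]
  | a :: b :: t, c => by
      have h : (a :: b :: t).length / 2 = t.length / 2 + 1 := by
        simp [List.length_cons]; omega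
      rw [h, List.range_succ_eq_map, List.foldl_cons, List.foldl_map]
      have hsh : ∀ (c' : Int) (k : Nat),
          (if (a::b::t).getD (2*(k+1)) ' ' = (a::b::t).getD (2*(k+1)+1) ' ' then c'+1 else c')
          = (if t.getD (2*k) ' ' = t.getD (2*k+1) ' ' then c'+1 else c') := by
        intro c' k
        have : 2*(k+1) = (2*k)+1+1 := by omega
        simp [this]
      simp only [Nat.succ_eq_add_one, hsh]
      have := range_pairs t (if a = b then c + 1 else c)
      simpa [altLoop] using this

theorem pyRange_step2 (n : Nat) :
    PySem.List.pyRange 0 ((n : Int) - 1) 2 = (List.range (n / 2)).map (fun k : Nat => (2:Int) * (k:Int)) := by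
  rw [PySem.List.pyRange_of_pos 0 ((n : Int) - 1) (by norm_num)]
  have : (if (0:Int) < (n:Int) - 1 then (((n:Int) - 1 - 0 + 2 - 1) / 2).toNat else 0) = n / 2 := by
    split_ifs with h <;> omega
  rw [this]
  exact List.map_congr_left (fun k _ => by ring)

theorem pyRange_step2_foldl (cs : List Char) (c : Int) :
    (PySem.List.pyRange 0 ((cs.length : Int) - 1) 2).foldl
      (fun count i =>
        if PySem.List.pyGetD cs i ' ' = PySem.List.pyGetD cs (i + 1) ' ' then count + 1
        else count)
      c = altLoop cs c := by
  rw [pyRange_step2 cs.length, List.foldl_map]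
  have h : ∀ (c' : Int) (k : Nat),
      (if PySem.List.pyGetD cs ((2:Int)*k) ' ' = PySem.List.pyGetD cs ((2:Int)*k + 1) ' ' then c'+1 else c')
      = (if cs.getD (2*k) ' ' = cs.getD (2*k+1) ' ' then c'+1 else c') := by
    intro c' k
    have h1 : (2:Int)*k = ((2*k : Nat) : Int) := by push_cast; ring
    have h2 : ((2*k : Nat) : Int) + 1 = ((2*k+1 : Nat) : Int) := by push_cast; ring
    rw [h1, h2, PySem.List.pyGetD_natCast, PySem.List.pyGetD_natCast]
  simp only [h]
  exact range_pairs cs c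

-- ===== VERDICT (by name: the statement is the Claim_ definition above) =====
theorem get_2_3_spec : Claim_equal_get_2_3 := by
  intro word _
  unfold Spec_get_2_3 get_2_3 get_2_3_alt
  simp only [pyRange_step2_foldl]
  by_cases h : altLoop word.toList 0 = 3 <;> simp [h]
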